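-- pv_equiv track=rewrite | github.com/athoca/sm | smartdrone/yaw.py | is_0_point
-- ===== SOURCE A (Python) =====
-- def is_0_point(nums):
--     for num in nums:
--         if num < 4:
--             for mum in nums:
--                 if mum > 176:
--                     return True
--             return False
--     return False
-- ===== SOURCE B (Python) =====
-- def is_0_point(nums):
--     has_small = False
--     has_large = False
--     for n in nums:
--         if not has_small and n < 4:
--             has_small = True
--         if not has_large and n > 176:
--             has_large = True
--         if has_small and has_large:
--             break
--     return has_small and has_large
-- ===== Notes on version B (the rewrite author's own statement) =====
-- stated objective: alternative
-- what changed: Replaced A's find-first-small-element-then-rescan-the-whole-list-for-a-large-one with a single pass maintaining two booleans (has_small, has_large) and an early break once both hold.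
import Mathlib
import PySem

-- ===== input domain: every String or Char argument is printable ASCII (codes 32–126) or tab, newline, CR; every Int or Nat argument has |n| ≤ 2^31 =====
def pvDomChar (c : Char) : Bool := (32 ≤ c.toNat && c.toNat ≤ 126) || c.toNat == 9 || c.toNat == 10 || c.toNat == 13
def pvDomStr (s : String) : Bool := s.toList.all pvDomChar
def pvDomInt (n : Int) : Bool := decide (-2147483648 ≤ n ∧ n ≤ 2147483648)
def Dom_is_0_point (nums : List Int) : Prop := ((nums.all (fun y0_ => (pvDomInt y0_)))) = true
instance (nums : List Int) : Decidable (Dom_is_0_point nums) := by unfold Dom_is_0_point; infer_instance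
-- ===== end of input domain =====

-- B replaces A's find-a-small-element-then-rescan-the-whole-list-for-a-large-one with a
-- single pass maintaining two booleans and an early break; return value only, no mutation.

-- ===== PORT A =====
-- inner 'for mum in nums: if mum > 176: return True / return False'
def isZeroInnerA : List Int → Bool
  | [] => false
  | m :: rest => if m > 176 then true else isZeroInnerA rest

-- outer 'for num in nums: if num < 4: <inner over the original list>', else fall through
def isZeroOuterA (orig : List Int) : List Int → Bool
  | [] => false
  | n :: rest => if n < 4 then isZeroInnerA orig else isZeroOuterA orig rest

def is_0_point (nums : List Int) : Bool := isZeroOuterA nums nums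

-- ===== PORT B =====
-- single loop carrying has_small / has_large, breaking as soon as both hold
def altLoop : List Int → Bool → Bool → Bool
  | [], hs, hl => hs && hl
  | n :: rest, hs, hl =>
    let hs' := if !hs && n < 4 then true else hs
    let hl' := if !hl && n > 176 then true else hl
    if hs' && hl' then true else altLoop rest hs' hl'

def is_0_point_alt (nums : List Int) : Bool := altLoop nums false false

-- ===== PRECONDITION & SPEC =====
def Spec_is_0_point (nums : List Int) (out : Bool) : Prop := out = is_0_point_alt nums
instance (nums : List Int) (out : Bool) : Decidable (Spec_is_0_point nums out) := by unfold Spec_is_0_point; infer_instance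

-- ===== CLAIM (what is proved, stated in full; the proofs are below) =====
def Claim_equal_is_0_point : Prop := ∀ (nums : List Int), Dom_is_0_point nums → Spec_is_0_point nums (is_0_point nums)

-- ===== LEMMAS AND PROOFS =====

theorem innerA_any (l : List Int) : isZeroInnerA l = l.any (fun m => decide (m > 176)) := by
  induction l with
  | nil => rfl
  | cons m rest ih =>
    by_cases h : m > 176 <;> simp [isZeroInnerA, h, ih]

theorem outerA_any (orig l : List Int) :
    isZeroOuterA orig l = (l.any (fun n => decide (n < 4)) && orig.any (fun m => decide (m > 176))) := by
  induction l with
  | nil => simp [isZeroOuterA]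
  | cons n rest ih =>
    by_cases h : n < 4 <;> simp [isZeroOuterA, h, ih, innerA_any]

theorem altLoop_any (l : List Int) (hs hl : Bool) :
    altLoop l hs hl = ((hs || l.any (fun n => decide (n < 4))) && (hl || l.any (fun m => decide (m > 176)))) := by
  induction l generalizing hs hl with
  | nil => simp [altLoop]
  | cons n rest ih =>
    simp only [altLoop, ih, List.any_cons]
    by_cases h1 : n < 4 <;> by_cases h2 : n > 176 <;>
      cases hs <;> cases hl <;> simp [h1, h2]

-- ===== VERDICT (by name: the statement is the Claim_ definition above) =====
theorem is_0_point_spec : Claim_equal_is_0_point := by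
  intro nums _
  unfold Spec_is_0_point is_0_point is_0_point_alt
  rw [outerA_any, altLoop_any]
  simp
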